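-- pv_equiv track=rewrite | github.com/arjunpvm/PDSA | notes/w1/l4.py | prime_diffs
-- ===== SOURCE A (Python) =====
-- import math
--
-- def prime3(n):
--     (is_prime, i) = (True, 2)
--     while (is_prime and i <= math.sqrt(n)):
--         if n % i == 0:
--             is_prime = False
--         i += 1
--     return is_prime
--
-- def prime_diffs(n):
--     prime_diff = {}
--     last_prime = 2
--     for i in range(3, n+1):
--         if prime3(i):
--             diff = i - last_prime
--             last_prime = i
--             if diff in prime_diff.keys():
--                 prime_diff[diff] = prime_diff[diff] + 1
--             else:
--                 prime_diff[diff] = 1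
--     return prime_diff
-- ===== SOURCE B (Python) =====
-- import math
--
-- def prime_diffs(n):
--     if n < 2:
--         return {}
--     sieve = [True] * (n + 1)
--     sieve[0] = sieve[1] = False
--     for p in range(2, math.isqrt(n) + 1):
--         for k in range(p, n // p + 1):
--             sieve[p * k] = False
--     primes = [i for i in range(2, n + 1) if sieve[i]]
--     counts = {}
--     for a, b in zip(primes, primes[1:]):
--         counts[b - a] = counts.get(b - a, 0) + 1
--     return counts
-- ===== Notes on version B (the rewrite author's own statement) =====
-- stated objective: faster
-- what changed: replaces per-number trial division (prime3 with a float-sqrt bound) by a sieve that marks p*k for p up to isqrt(n), then counts gaps by folding over zip(primes, primes[1:]) instead of threading last_prime through the range loop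
import Mathlib
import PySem

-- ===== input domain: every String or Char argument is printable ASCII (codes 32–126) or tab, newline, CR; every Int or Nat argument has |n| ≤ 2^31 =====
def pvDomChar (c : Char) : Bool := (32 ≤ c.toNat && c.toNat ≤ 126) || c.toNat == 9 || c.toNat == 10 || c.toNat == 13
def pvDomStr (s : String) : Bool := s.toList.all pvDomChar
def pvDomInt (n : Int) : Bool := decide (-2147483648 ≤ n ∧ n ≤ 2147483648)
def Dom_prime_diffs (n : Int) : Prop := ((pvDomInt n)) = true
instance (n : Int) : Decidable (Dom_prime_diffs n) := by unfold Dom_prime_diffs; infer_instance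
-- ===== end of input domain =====

-- B replaces A's per-number trial division by a sieve and counts gaps over zip(primes, primes[1:]): faster.

-- ===== PORT A =====
-- while (is_prime and i <= math.sqrt(n)): math.sqrt is correctly rounded, so for the
-- integers i, n admitted by Dom (|n| ≤ 2^31) 'i <= math.sqrt(n)' holds iff i*i ≤ n; ported as i*i ≤ n.
-- Fuel n.toNat bounds the iteration count (the loop exits once i*i > n, and i starts at 2).
def prime3Go (n : Int) : Nat → Int → Bool → Bool
  | 0, _, isp => isp
  | fuel+1, i, isp =>
    if isp && decide (i * i ≤ n) then
      prime3Go n fuel (i + 1) (if PySem.Int.mod n i == 0 then false else isp)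
    else isp

def prime3 (n : Int) : Bool := prime3Go n n.toNat 2 true

def prime_diffs (n : Int) : List (Int × Int) :=
  let st := (PySem.List.pyRange 3 (n + 1) 1).foldl
    (fun (st : Int × PySem.Dict Int Int) i =>
      if prime3 i then
        let diff := i - st.1
        -- if diff in prime_diff.keys(): prime_diff[diff] += 1 else: prime_diff[diff] = 1
        let d := match st.2.get? diff with
          | some v => st.2.insert diff (v + 1)
          | none   => st.2.insert diff 1
        (i, d)
      else st) (2, PySem.Dict.empty)
  st.2.items

-- ===== PORT B =====
-- the mutable Python list 'sieve' of booleans is ported as Array Bool (index m, 0 ≤ m ≤ n, in bounds);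
-- math.isqrt(n) for n ≥ 0 is exactly Nat.sqrt n.toNat.
def prime_diffs_alt (n : Int) : List (Int × Int) :=
  if n < 2 then ([] : List (Int × Int))  -- return {}
  else
    let s0 := ((Array.replicate (n + 1).toNat true).set! 0 false).set! 1 false
    let sv := (PySem.List.pyRange 2 ((Nat.sqrt n.toNat : Int) + 1) 1).foldl
      (fun a p => (PySem.List.pyRange p (PySem.Int.floordiv n p + 1) 1).foldl
        (fun a k => a.set! (p * k).toNat false) a) s0
    let primes := (PySem.List.pyRange 2 (n + 1) 1).filter (fun i => sv.getD i.toNat false)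
    let counts := (primes.zip (PySem.List.slice primes (some 1) none)).foldl
      (fun (d : PySem.Dict Int Int) pr => d.insert (pr.2 - pr.1) (d.getD (pr.2 - pr.1) 0 + 1))
      PySem.Dict.empty
    counts.items

-- ===== PRECONDITION & SPEC =====
def Spec_prime_diffs (n : Int) (out : List (Int × Int)) : Prop := out = prime_diffs_alt n
instance (n : Int) (out : List (Int × Int)) : Decidable (Spec_prime_diffs n out) := by unfold Spec_prime_diffs; infer_instance

-- ===== CLAIM (what is proved, stated in full; the proofs are below) =====
def Claim_equal_prime_diffs : Prop := ∀ (n : Int), Dom_prime_diffs n → Spec_prime_diffs n (prime_diffs n)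

-- ===== LEMMAS AND PROOFS =====

-- A's trial-division loop: prime3 n is true iff n has no divisor d with 2 ≤ d, d*d ≤ n
lemma prime3Go_false (n : Int) : ∀ fuel i, prime3Go n fuel i false = false := by
  intro fuel i; cases fuel <;> simp [prime3Go]

lemma prime3Go_spec (n : Int) : ∀ (fuel : Nat) (i : Int), 2 ≤ i → n < (i + fuel) * (i + fuel) →
    (prime3Go n fuel i true = true ↔ ¬ ∃ d, i ≤ d ∧ d * d ≤ n ∧ PySem.Int.mod n d = 0) := by
  intro fuel
  induction fuel with
  | zero =>
    intro i hi hlt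
    simp only [prime3Go]
    refine iff_of_true trivial ?_
    rintro ⟨d, hd1, hd2, _⟩
    push_cast at hlt
    nlinarith
  | succ fuel ih =>
    intro i hi hlt
    by_cases hsq : i * i ≤ n
    · simp only [prime3Go, hsq, decide_true, Bool.and_self, if_true]
      by_cases hm : PySem.Int.mod n i = 0
      · have hbe : (PySem.Int.mod n i == 0) = true := by simp [hm]
        simp only [hbe, if_true, prime3Go_false, Bool.false_eq_true, false_iff, not_not]
        exact ⟨i, le_refl i, hsq, hm⟩
      · have hne : (PySem.Int.mod n i == 0) = false := by simp [hm]
        simp only [hne, Bool.false_eq_true, if_false]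
        have hlt' : n < (i + 1 + fuel) * (i + 1 + fuel) := by push_cast at hlt ⊢; nlinarith
        rw [ih (i + 1) (by omega) hlt']
        constructor
        · rintro h ⟨d, hd1, hd2, hd3⟩
          rcases eq_or_lt_of_le hd1 with rfl | hgt
          · exact hm hd3
          · exact h ⟨d, by omega, hd2, hd3⟩
        · rintro h ⟨d, hd1, hd2, hd3⟩
          exact h ⟨d, by omega, hd2, hd3⟩
    · simp only [prime3Go, hsq, decide_false, Bool.and_false, Bool.false_eq_true, if_false]
      refine iff_of_true trivial ?_
      rintro ⟨d, hd1, hd2, _⟩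
      nlinarith

lemma prime3_iff (n : Int) :
    prime3 n = true ↔ ¬ ∃ d, 2 ≤ d ∧ d * d ≤ n ∧ PySem.Int.mod n d = 0 := by
  have h : n < ((2 : Int) + n.toNat) * (2 + n.toNat) := by
    by_cases h0 : 0 ≤ n
    · have : ((n.toNat : Int)) = n := Int.toNat_of_nonneg h0
      nlinarith
    · have : ((n.toNat : Int)) = 0 := by omega
      rw [this]; omega
  exact prime3Go_spec n n.toNat 2 (by omega) h

-- a fold of set!-to-false operations, read back with default false
lemma getD_set_false (a : Array Bool) (k j : Nat) :
    (a.set! k false).getD j false = (a.getD j false && !(k == j)) := by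
  by_cases hk : k = j
  · subst hk
    by_cases hj : k < a.size
    · simp [Array.set!, Array.getD, hj]
    · simp [Array.set!, Array.getD, hj]
  · by_cases hj : j < a.size
    · simp [Array.set!, Array.getD, hj, Array.getElem_setIfInBounds, hk]
    · simp [Array.set!, Array.getD, hj]

lemma getD_foldl_set_false (ms : List Int) : ∀ (a : Array Bool) (j : Nat),
    (ms.foldl (fun a m => a.set! m.toNat false) a).getD j false
      = (a.getD j false && !(ms.any (fun m => m.toNat == j))) := by
  induction ms with
  | nil => intro a j; simp
  | cons m ms ih =>
    intro a j
    simp only [List.foldl_cons, List.any_cons, ih, getD_set_false, Bool.not_or]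
    cases a.getD j false <;> cases h : (m.toNat == j) <;> simp

lemma getD_foldl_nested (g : Int → List Int) (h : Int → Int → Int) (ps : List Int) :
    ∀ (a : Array Bool) (j : Nat),
    (ps.foldl (fun a p => (g p).foldl (fun a k => a.set! (h p k).toNat false) a) a).getD j false
      = (a.getD j false && !(ps.any (fun p => (g p).any (fun k => (h p k).toNat == j)))) := by
  induction ps with
  | nil => intro a j; simp
  | cons p ps ih =>
    intro a j
    have hmap : (g p).foldl (fun a k => a.set! (h p k).toNat false) a
        = ((g p).map (h p)).foldl (fun a m => a.set! m.toNat false) a := by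
      rw [List.foldl_map]
    simp only [List.foldl_cons, List.any_cons, ih, hmap, getD_foldl_set_false, List.any_map,
      Bool.not_or, Function.comp_def]
    cases a.getD j false <;> cases hx : ((g p).any (fun k => (h p k).toNat == j)) <;> simp

-- the marking set of B's sieve is exactly 'has a divisor d with 2 ≤ d, d*d ≤ q'
lemma marked_iff (n q : Int) (hn : 2 ≤ n) (hq2 : 2 ≤ q) (hqn : q ≤ n) :
    ((PySem.List.pyRange 2 ((Nat.sqrt n.toNat : Int) + 1) 1).any
        (fun p => (PySem.List.pyRange p (PySem.Int.floordiv n p + 1) 1).any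
          (fun k => (p * k).toNat == q.toNat)) = true)
      ↔ ∃ d, 2 ≤ d ∧ d * d ≤ q ∧ PySem.Int.mod q d = 0 := by
  simp only [List.any_eq_true, PySem.List.mem_pyRange_one, beq_iff_eq]
  constructor
  · rintro ⟨p, ⟨hp2, _⟩, k, ⟨hpk, _⟩, heq⟩
    have hpk0 : 0 ≤ p * k := by nlinarith
    have hq0 : 0 ≤ q := by omega
    have hpkq : p * k = q := by omega
    refine ⟨p, hp2, by nlinarith, ?_⟩
    rw [PySem.Int.mod_eq_emod_of_pos (by omega), ← hpkq]
    simp [Int.mul_emod_right]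
  · rintro ⟨d, hd2, hdd, hmod⟩
    rw [PySem.Int.mod_eq_emod_of_pos (by omega)] at hmod
    have hdvd : d ∣ q := Int.dvd_of_emod_eq_zero hmod
    refine ⟨d, ⟨hd2, ?_⟩, q / d, ⟨?_, ?_⟩, ?_⟩
    · -- d ≤ Nat.sqrt n.toNat since d*d ≤ q ≤ n
      have h1 : d.toNat * d.toNat ≤ n.toNat := by
        have hd0 : 0 ≤ d := by omega
        have : (d.toNat : Int) * (d.toNat : Int) ≤ (n.toNat : Int) := by
          rw [Int.toNat_of_nonneg hd0, Int.toNat_of_nonneg (by omega)]; omega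
        exact_mod_cast this
      have := (Nat.le_sqrt.mpr h1)
      omega
    · -- d ≤ q / d
      have : d * d ≤ d * (q / d) := by
        rw [Int.mul_ediv_cancel' hdvd]; exact hdd
      exact le_of_mul_le_mul_left this (by omega)
    · -- q / d < n // d + 1
      rw [PySem.Int.floordiv_eq_ediv_of_pos (by omega)]
      have := Int.ediv_le_ediv (by omega : (0:Int) < d) hqn
      omega
    · -- d * (q / d) and q have the same toNat
      rw [Int.mul_ediv_cancel' hdvd]

-- the initial sieve array reads true exactly at indices 2..n
lemma s0_getD (n q : Int) (hn : 2 ≤ n) (hq2 : 2 ≤ q) (hqn : q ≤ n) :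
    (((Array.replicate (n + 1).toNat true).set! 0 false).set! 1 false).getD q.toNat false = true := by
  have hsz : q.toNat < (n + 1).toNat := by omega
  have h0 : (0 : Nat) ≠ q.toNat := by omega
  have h1 : (1 : Nat) ≠ q.toNat := by omega
  simp [Array.set!, Array.getD, hsz, h0, h1]

-- B's sieve agrees with A's trial division on 2..n
lemma sieve_eq_prime3 (n q : Int) (hn : 2 ≤ n) (hq2 : 2 ≤ q) (hqn : q ≤ n) :
    ((PySem.List.pyRange 2 ((Nat.sqrt n.toNat : Int) + 1) 1).foldl
        (fun a p => (PySem.List.pyRange p (PySem.Int.floordiv n p + 1) 1).foldl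
          (fun a k => a.set! (p * k).toNat false) a)
        (((Array.replicate (n + 1).toNat true).set! 0 false).set! 1 false)).getD q.toNat false
      = prime3 q := by
  rw [getD_foldl_nested, s0_getD n q hn hq2 hqn, Bool.true_and]
  by_cases h : ∃ d, 2 ≤ d ∧ d * d ≤ q ∧ PySem.Int.mod q d = 0
  · have hm := (marked_iff n q hn hq2 hqn).mpr h
    have hpf : prime3 q = false := by
      rw [← Bool.not_eq_true, prime3_iff]; exact not_not_intro h
    rw [hm, hpf]; rfl
  · have hm : ((PySem.List.pyRange 2 ((Nat.sqrt n.toNat : Int) + 1) 1).any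
        (fun p => (PySem.List.pyRange p (PySem.Int.floordiv n p + 1) 1).any
          (fun k => (p * k).toNat == q.toNat))) = false := by
      rw [← Bool.not_eq_true]; intro hc
      exact h ((marked_iff n q hn hq2 hqn).mp hc)
    rw [hm]
    have := (prime3_iff q).mpr h
    simp [this]
  
-- A's dict-update branch is B's unconditional get-default insert
lemma upd_eq (d : PySem.Dict Int Int) (k : Int) :
    (match d.get? k with
      | some v => d.insert k (v + 1)
      | none   => d.insert k 1)
      = d.insert k (d.getD k 0 + 1) := by
  cases h : d.get? k with
  | some v => simp [PySem.Dict.getD_eq_get?_getD, h]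
  | none => simp [PySem.Dict.getD_eq_get?_getD, h]

-- threading last_prime through a fold = folding over consecutive pairs
lemma thread_eq : ∀ (qs : List Int) (last : Int) (d : PySem.Dict Int Int),
    (qs.foldl (fun (st : Int × PySem.Dict Int Int) i =>
        (i, st.2.insert (i - st.1) (st.2.getD (i - st.1) 0 + 1))) (last, d)).2
      = ((last :: qs).zip qs).foldl
          (fun (d : PySem.Dict Int Int) pr => d.insert (pr.2 - pr.1) (d.getD (pr.2 - pr.1) 0 + 1)) d := by
  intro qs
  induction qs with
  | nil => intro last d; simp
  | cons q rest ih =>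
    intro last d
    simp only [List.foldl_cons, List.zip_cons_cons, ih]

-- ===== VERDICT (by name: the statement is the Claim_ definition above) =====
theorem prime_diffs_spec : Claim_equal_prime_diffs := by
  intro n _
  unfold Spec_prime_diffs prime_diffs prime_diffs_alt
  by_cases hn : n < 2
  · rw [PySem.List.pyRange_one_eq_nil (by omega)]
    simp only [List.foldl_nil, if_pos hn]
    rfl
  · replace hn : 2 ≤ n := by omega
    simp only [if_neg (by omega : ¬ n < 2)]
    -- primes = 2 :: filter prime3 (range 3 (n+1))
    rw [PySem.List.pyRange_one_cons (by omega : (2:Int) < n + 1),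
      show (2:Int) + 1 = 3 from by norm_num]
    have h2 : (((PySem.List.pyRange 2 ((Nat.sqrt n.toNat : Int) + 1) 1).foldl
        (fun a p => (PySem.List.pyRange p (PySem.Int.floordiv n p + 1) 1).foldl
          (fun a k => a.set! (p * k).toNat false) a)
        (((Array.replicate (n + 1).toNat true).set! 0 false).set! 1 false)).getD (2:Int).toNat false) = true := by
      rw [sieve_eq_prime3 n 2 hn (by omega) hn]; decide
    simp only [List.filter_cons, h2, if_true]
    have hfe : List.filter (fun x =>
        (((PySem.List.pyRange 2 ((Nat.sqrt n.toNat : Int) + 1) 1).foldl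
          (fun a p => (PySem.List.pyRange p (PySem.Int.floordiv n p + 1) 1).foldl
            (fun a k => a.set! (p * k).toNat false) a)
          (((Array.replicate (n + 1).toNat true).set! 0 false).set! 1 false)).getD x.toNat false))
          (PySem.List.pyRange 3 (n + 1) 1)
        = List.filter (fun i => prime3 i) (PySem.List.pyRange 3 (n + 1) 1) := by
      apply List.filter_congr
      intro x hx
      rw [PySem.List.mem_pyRange_one] at hx
      exact sieve_eq_prime3 n x hn (by omega) (by omega)
    rw [hfe]
    -- A's fold with the if-guard = fold over the filtered list
    rw [show (fun (st : Int × PySem.Dict Int Int) i =>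
        if prime3 i then
          (i, match st.2.get? (i - st.1) with
              | some v => st.2.insert (i - st.1) (v + 1)
              | none   => st.2.insert (i - st.1) 1)
        else st)
      = (fun (st : Int × PySem.Dict Int Int) i =>
        if prime3 i = true then
          (i, st.2.insert (i - st.1) (st.2.getD (i - st.1) 0 + 1)) else st) from
      funext fun st => funext fun i => by rw [upd_eq]]
    rw [PySem.List.foldl_if_eq_foldl_filter]
    -- slice primes 1 none = tail
    rw [show PySem.List.slice
        ((2:Int) :: (PySem.List.pyRange 3 (n + 1) 1).filter (fun i => prime3 i)) (some 1) none
      = (PySem.List.pyRange 3 (n + 1) 1).filter (fun i => prime3 i) from by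
        have := PySem.List.slice_from_natCast
          ((2:Int) :: (PySem.List.pyRange 3 (n + 1) 1).filter (fun i => prime3 i)) 1
        simpa using this]
    exact congrArg PySem.Dict.items (thread_eq _ 2 PySem.Dict.empty)
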